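-- pv_equiv track=rewrite | github.com/rhyn0/Euler | Python/euler_funcs.py | euler26
-- ===== SOURCE A (Python) =====
-- def euler26(n: int = 1000) -> int:
--     """Reciprocal cycles
--
--     A unit fraction is one with a one in the numerator. Find d, d < n,
--     such that the unit fraction of d has the longest repeating cycle.
--     A repeating cycle like 1 / 7 = 0.(142857)... where repeats infinitely.
--
--     Parameters
--     ----------
--     n : int, optional
--         Limit to find denominator under, by default 1000
--
--     Returns
--     -------
--     int
--     """
--     """
--     # idea is that we keep doing long division until a value repeats itself
--     longest_cycle, cycle_num = 0, 0
--     for i in range(n - 1, 1, -1):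
--         # since i is decreasing, can't create longer cycles later on
--         if longest_cycle >= i:
--             break
--         remainder_list = [0] * i
--         # start at 1 because unit fraction, the first remainder is always 1
--         numerator_val = 1
--         position = 0
--         while remainder_list[numerator_val] == 0 and numerator_val != 0:
--             remainder_list[numerator_val] = position
--             numerator_val = (numerator_val * 10) % i
--             position += 1
--         # comparison isn't just position > longest_cycle
--         # because the repetition might not start at 0
--         if position - remainder_list[numerator_val] > longest_cycle:
--             longest_cycle = position - remainder_list[numerator_val]
--             cycle_num = i
--
--     return cycle_num
--     """
--     # less memory intensive method
--     def recurring_cycle(d):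
--         # solve 10^s % d == 10^(s+t) % d
--         # where t is length and s is start
--         # how many times do we multiply by 10 until we reach a repeating val
--         for s in range(d - 1):
--             for t in range(1, d):
--                 if 10 ** s % d == 10 ** t % d:
--                     return t
--         return 0
--
--     longest = max(recurring_cycle(i) for i in range(2, n))
--     return [i for i in range(2, n) if recurring_cycle(i) == longest][0]
-- ===== SOURCE B (Python) =====
-- def euler26(n: int = 1000) -> int:
--     """Reciprocal cycles: single pass, incremental long-division order computation.
--
--     For d coprime to 10, the cycle length of 1/d is the multiplicative order of
--     10 mod d, found by repeated 'r = r * 10 % d'; denominators sharing a factor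
--     with 10 are counted as cycle length 0. Track the first best while scanning.
--     """
--     best_len, best_d = -1, 0
--     for d in range(2, n):
--         length = 0
--         if d % 2 != 0 and d % 5 != 0:
--             r = 1
--             for t in range(1, d):
--                 r = r * 10 % d
--                 if r == 1:
--                     length = t
--                     break
--         if length > best_len:
--             best_len, best_d = length, d
--     return best_d
-- ===== Notes on version B (the rewrite author's own statement) =====
-- stated objective: faster
-- what changed: A computes each cycle length by a nested quadratic search over exponent pairs (s,t) with big-integer exponentiation 10**s, then scans the range twice (max + filter); B does one pass, computing for each denominator coprime to 10 the multiplicative order of 10 by incremental 'r = r*10 % d' (0 for denominators sharing a factor with 10) and tracking the first best on the fly.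
-- outside the precondition, e.g. on euler26(2): A raises ValueError, B returns 0
import Mathlib
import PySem

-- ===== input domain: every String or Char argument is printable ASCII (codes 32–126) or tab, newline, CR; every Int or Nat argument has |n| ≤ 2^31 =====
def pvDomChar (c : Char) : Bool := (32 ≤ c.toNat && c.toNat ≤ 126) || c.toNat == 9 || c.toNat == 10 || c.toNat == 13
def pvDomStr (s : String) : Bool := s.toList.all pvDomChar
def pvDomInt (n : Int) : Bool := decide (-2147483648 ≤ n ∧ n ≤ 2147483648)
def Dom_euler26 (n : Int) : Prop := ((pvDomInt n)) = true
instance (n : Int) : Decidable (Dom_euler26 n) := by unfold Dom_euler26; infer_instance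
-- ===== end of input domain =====

-- B replaces A's nested big-integer exponent search and double range scan by one pass that
-- computes each cycle length incrementally (r = r*10 % d) and tracks the first best: faster.


-- ===== PORT A =====
-- recurring_cycle: for s in range(d-1): for t in range(1, d): if 10**s % d == 10**t % d: return t
-- (early return of nested loops = findSome? of the outer range over find? of the inner range)
def rcA (d : Int) : Int :=
  match (PySem.List.pyRange 0 (d - 1) 1).findSome? (fun s =>
      (PySem.List.pyRange 1 d 1).find? (fun t =>
        PySem.Int.mod (10 ^ s.toNat) d == PySem.Int.mod (10 ^ t.toNat) d)) with
  | some t => t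
  | none => 0

def euler26 (n : Int) : Int :=
  match PySem.List.max? ((PySem.List.pyRange 2 n 1).map rcA) (fun x => x) with
  | none => 0          -- Python: max() of an empty sequence raises ValueError (n ≤ 2); excluded by Pre_
  | some longest =>
    match (PySem.List.pyRange 2 n 1).filter (fun i => rcA i == longest) with
    | [] => 0          -- unreachable: the maximum is attained, so [ ... ][0] never raises
    | i :: _ => i

-- ===== PORT B =====
-- inner 'for t in range(1, d): r = r*10 % d; if r == 1: length = t; break' (length stays 0 on fall-through)
def cycLoop (d : Int) : List Int → Int → Int
  | [], _ => 0
  | t :: ts, r =>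
    let r' := PySem.Int.mod (r * 10) d
    if r' == 1 then t else cycLoop d ts r'

def cycB (d : Int) : Int :=
  if (PySem.Int.mod d 2 != 0) && (PySem.Int.mod d 5 != 0) then
    cycLoop d (PySem.List.pyRange 1 d 1) 1
  else 0

def euler26_alt (n : Int) : Int :=
  ((PySem.List.pyRange 2 n 1).foldl
    (fun (best : Int × Int) d => if cycB d > best.1 then (cycB d, d) else best)
    (-1, 0)).2

-- ===== PRECONDITION & SPEC =====
-- Pre_ excludes exactly n ≤ 2, where range(2, n) is empty and A's max() raises ValueError.
def Pre_euler26 (n : Int) : Prop := 3 ≤ n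
instance (n : Int) : Decidable (Pre_euler26 n) := by unfold Pre_euler26; infer_instance
def pvWitness_euler26 : Int := 10

def Spec_euler26 (n : Int) (out : Int) : Prop := out = euler26_alt n
instance (n : Int) (out : Int) : Decidable (Spec_euler26 n out) := by unfold Spec_euler26; infer_instance

-- ===== CLAIM (what is proved, stated in full; the proofs are below) =====
def Claim_equal_euler26 : Prop := ∀ (n : Int), Dom_euler26 n → Pre_euler26 n → Spec_euler26 n (euler26 n)
-- ===== LEMMAS AND PROOFS =====

-- the common core of both programs: the first t in [1, d) with 10^t % d == 1
def firstPow1 (d : Int) : Option Int :=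
  (PySem.List.pyRange 1 d 1).find? (fun t => PySem.Int.mod (10 ^ t.toNat) d == 1)

-- generic list facts ---------------------------------------------------------
theorem find?_congr_mem {α : Type} (p q : α → Bool) :
    ∀ l : List α, (∀ x ∈ l, p x = q x) → l.find? p = l.find? q := by
  intro l
  induction l with
  | nil => intro _; rfl
  | cons a t ih =>
    intro h
    simp only [List.find?_cons]
    rw [h a (by simp)]
    cases q a
    · exact ih (fun x hx => h x (by simp [hx]))
    · rfl

theorem filter_cons_of_find? {p : Int → Bool} :
    ∀ {l : List Int} {i0 : Int}, l.find? p = some i0 → ∃ tl, l.filter p = i0 :: tl := by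
  intro l
  induction l with
  | nil => intro i0 h; simp at h
  | cons a t ih =>
    intro i0 h
    by_cases hpa : p a = true
    · rw [List.find?_cons_of_pos hpa] at h
      obtain rfl := Option.some_inj.mp h
      exact ⟨t.filter p, by rw [List.filter_cons_of_pos hpa]⟩
    · rw [List.find?_cons_of_neg (by simpa using hpa)] at h
      obtain ⟨tl, htl⟩ := ih h
      exact ⟨tl, by simp [List.filter_cons, hpa, htl]⟩

theorem foldl_best_stay (f : Int → Int) :
    ∀ (l : List Int) (b x : Int), (∀ y ∈ l, f y ≤ b) →
      l.foldl (fun (best : Int × Int) d => if f d > best.1 then (f d, d) else best) (b, x) = (b, x) := by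
  intro l
  induction l with
  | nil => intro b x _; rfl
  | cons a t ih =>
    intro b x h
    simp only [List.foldl_cons]
    rw [if_neg (by simpa using not_lt.mpr (h a (by simp)))]
    exact ih b x (fun y hy => h y (by simp [hy]))

theorem foldl_best_spec (f : Int → Int) (M i0 : Int) :
    ∀ (l : List Int) (b x : Int), b < M → (∀ y ∈ l, f y ≤ M) →
      l.find? (fun i => f i == M) = some i0 →
      l.foldl (fun (best : Int × Int) d => if f d > best.1 then (f d, d) else best) (b, x) = (M, i0) := by
  intro l
  induction l with
  | nil => intro b x _ _ h; simp at h
  | cons a t ih =>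
    intro b x hb hle hfind
    by_cases ha : f a = M
    · rw [List.find?_cons_of_pos (by simp [ha])] at hfind
      have hi0 : a = i0 := Option.some_inj.mp hfind
      simp only [List.foldl_cons]
      rw [if_pos (by simpa [ha] using hb), ha, hi0]
      exact foldl_best_stay f t M i0 (fun y hy => hle y (by simp [hy]))
    · rw [List.find?_cons_of_neg (by simp [ha])] at hfind
      have haM : f a < M := lt_of_le_of_ne (hle a (by simp)) ha
      simp only [List.foldl_cons]
      by_cases hup : f a > b
      · rw [if_pos hup]
        exact ih (f a) a haM (fun y hy => hle y (by simp [hy])) hfind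
      · rw [if_neg hup]
        exact ih b x hb (fun y hy => hle y (by simp [hy])) hfind

-- characterisation of A's recurring_cycle ------------------------------------
theorem rcA_char (d : Int) (hd : 2 ≤ d) :
    rcA d = match firstPow1 d with
            | some t => t
            | none => if d = 2 then 0 else 1 := by
  by_cases h2 : d = 2
  · subst h2; decide
  · have hd3 : 3 ≤ d := by omega
    unfold rcA
    rw [PySem.List.pyRange_one_cons (show (0:Int) < d - 1 by omega),
        PySem.List.pyRange_one_cons (show (0:Int) + 1 < d - 1 by omega)]
    simp only [List.findSome?_cons]
    have hmod1 : PySem.Int.mod ((10:Int) ^ ((0:Int)).toNat) d = 1 := by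
      rw [show ((0:Int)).toNat = 0 from rfl, pow_zero, PySem.Int.mod_eq_emod_of_pos (by omega)]
      exact Int.emod_eq_of_lt (by norm_num) (by omega)
    have h0 : (PySem.List.pyRange 1 d 1).find?
        (fun t => PySem.Int.mod ((10:Int) ^ ((0:Int)).toNat) d == PySem.Int.mod (10 ^ t.toNat) d)
        = firstPow1 d := by
      unfold firstPow1
      apply find?_congr_mem
      intro t _
      rw [hmod1]
      simp [eq_comm]
    rw [h0]
    cases hF : firstPow1 d with
    | some t => simp
    | none =>
      rw [PySem.List.pyRange_one_cons (show (1:Int) < d by omega)]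
      simp only [List.find?_cons, show (((0:Int)+1)).toNat = 1 from rfl,
                 show ((1:Int)).toNat = 1 from rfl, beq_self_eq_true]
      simp [h2]

-- characterisation of B's inner loop ------------------------------------------
theorem cycLoop_eq (d : Int) (hd : 2 ≤ d) :
    ∀ (k : Nat) (a r : Int), (d - a).toNat = k → 1 ≤ a →
      r = PySem.Int.mod (10 ^ (a - 1).toNat) d →
      cycLoop d (PySem.List.pyRange a d 1) r
        = match (PySem.List.pyRange a d 1).find? (fun t => PySem.Int.mod (10 ^ t.toNat) d == 1) with
          | some t => t
          | none => 0 := by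
  intro k
  induction k with
  | zero =>
    intro a r hk _ _
    rw [PySem.List.pyRange_one_eq_nil (by omega)]
    rfl
  | succ k ih =>
    intro a r hk ha hr
    have had : a < d := by omega
    rw [PySem.List.pyRange_one_cons had]
    have hr' : PySem.Int.mod (r * 10) d = PySem.Int.mod ((10:Int) ^ a.toNat) d := by
      rw [hr, PySem.Int.mod_eq_emod_of_pos (by omega), PySem.Int.mod_eq_emod_of_pos (by omega),
          PySem.Int.mod_eq_emod_of_pos (by omega)]
      rw [Int.mul_emod, Int.emod_emod_of_dvd _ dvd_rfl, ← Int.mul_emod]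
      have : (10:Int) ^ (a - 1).toNat * 10 = 10 ^ a.toNat := by
        rw [← pow_succ]
        congr 1
        omega
      rw [this]
    show (if PySem.Int.mod (r * 10) d == 1 then a else cycLoop d (PySem.List.pyRange (a+1) d 1) (PySem.Int.mod (r * 10) d)) = _
    rw [List.find?_cons]
    by_cases hhit : (PySem.Int.mod ((10:Int) ^ a.toNat) d == 1) = true
    · rw [if_pos (by rw [hr']; exact hhit), hhit]
    · rw [if_neg (by rw [hr']; simpa using hhit)]
      rw [Bool.of_not_eq_true hhit]
      exact ih (a + 1) _ (by omega) (by omega) (by rw [hr']; congr 2; omega)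

-- number theory: existence / absence of a t with 10^t % d = 1 -----------------
theorem firstPow1_isSome (d : Int) (hd : 2 ≤ d) (h2 : ¬ (2 ∣ d)) (h5 : ¬ (5 ∣ d)) :
    ∃ t, firstPow1 d = some t := by
  obtain ⟨k, hk2, rfl⟩ : ∃ k : Nat, 2 ≤ k ∧ d = (k : Int) := ⟨d.toNat, by omega, by omega⟩
  have h2' : ¬ (2 ∣ k) := fun h => h2 (by exact_mod_cast Int.natCast_dvd_natCast.mpr h)
  have h5' : ¬ (5 ∣ k) := fun h => h5 (by exact_mod_cast Int.natCast_dvd_natCast.mpr h)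
  have hco : Nat.Coprime 10 k := by
    rw [show (10:Nat) = 2 * 5 from rfl, Nat.coprime_mul_iff_left]
    exact ⟨(Nat.Prime.coprime_iff_not_dvd Nat.prime_two).mpr h2',
           (Nat.Prime.coprime_iff_not_dvd (by norm_num)).mpr h5'⟩
  have hpow : (10:Nat) ^ k.totient % k = 1 := by
    have h := Nat.ModEq.pow_totient hco
    unfold Nat.ModEq at h
    have h1 : (1:Nat) % k = 1 := Nat.mod_eq_of_lt (by omega)
    rw [h1] at h
    exact h
  have htot1 : 1 ≤ k.totient := Nat.totient_pos.mpr (by omega)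
  have htotm : k.totient < k := Nat.totient_lt k (by omega)
  have hmem : ((k.totient : Int)) ∈ PySem.List.pyRange 1 (k : Int) 1 := by
    rw [PySem.List.mem_pyRange_one]
    omega
  have hpred : (PySem.Int.mod ((10:Int) ^ ((k.totient : Int)).toNat) (k : Int) == 1) = true := by
    rw [Int.toNat_natCast]
    rw [show (10:Int) ^ k.totient = (((10:Nat) ^ k.totient : Nat) : Int) by push_cast; ring]
    rw [PySem.Int.mod_natCast, hpow]
    simp
  refine Option.isSome_iff_exists.mp (List.find?_isSome.mpr ⟨(k.totient : Int), hmem, ?_⟩)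
  exact hpred

theorem firstPow1_none (d : Int) (hd : 2 ≤ d) (h : 2 ∣ d ∨ 5 ∣ d) :
    firstPow1 d = none := by
  unfold firstPow1
  apply List.find?_eq_none.mpr
  intro t htmem
  rw [PySem.List.mem_pyRange_one] at htmem
  simp only [beq_iff_eq]
  intro habs
  obtain ⟨p, hp10, hpd⟩ : ∃ p : Int, p ∣ 10 ∧ p ∣ d ∧ (2 ≤ p) := by
    rcases h with h | h
    · exact ⟨2, by norm_num, h, by norm_num⟩
    · exact ⟨5, by norm_num, h, by norm_num⟩
  have hmodp : (10:Int) ^ t.toNat % p = 1 % p := by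
    have hd0 : (0:Int) < d := by omega
    rw [PySem.Int.mod_eq_emod_of_pos hd0] at habs
    calc (10:Int) ^ t.toNat % p = (10:Int) ^ t.toNat % d % p := (Int.emod_emod_of_dvd _ hpd.1).symm
      _ = 1 % p := by rw [habs]
  have hpdvd : p ∣ (10:Int) ^ t.toNat := by
    have ht1 : 1 ≤ t.toNat := by omega
    exact dvd_pow hp10 (by omega)
  rw [Int.emod_eq_zero_of_dvd hpdvd] at hmodp
  have h1p : (1:Int) % p = 1 := Int.emod_eq_of_lt (by norm_num) (by omega)
  omega

-- per-denominator bridge -------------------------------------------------------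
theorem cycB_coprime (d : Int) (hd : 2 ≤ d) (h2 : ¬ (2 ∣ d)) (h5 : ¬ (5 ∣ d)) :
    cycB d = match firstPow1 d with | some t => t | none => 0 := by
  unfold cycB
  rw [if_pos]
  · exact cycLoop_eq d hd (d - 1).toNat 1 1 (by omega) (by omega)
      (by rw [show ((1:Int) - 1).toNat = 0 from rfl, pow_zero,
              PySem.Int.mod_eq_emod_of_pos (by omega)]
          exact (Int.emod_eq_of_lt (by norm_num) (by omega)).symm)
  · simp only [bne_iff_ne, ne_eq, Bool.and_eq_true, decide_eq_true_eq]
    constructor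
    · intro hcontra; exact h2 ((PySem.Int.mod_eq_zero_iff_dvd d 2).mp hcontra)
    · intro hcontra; exact h5 ((PySem.Int.mod_eq_zero_iff_dvd d 5).mp hcontra)

theorem cycB_noncop (d : Int) (h : 2 ∣ d ∨ 5 ∣ d) : cycB d = 0 := by
  unfold cycB
  rw [if_neg]
  simp only [bne_iff_ne, ne_eq, Bool.and_eq_true, decide_eq_true_eq, not_and_or, not_not]
  rcases h with h | h
  · exact Or.inl ((PySem.Int.mod_eq_zero_iff_dvd d 2).mpr h)
  · exact Or.inr ((PySem.Int.mod_eq_zero_iff_dvd d 5).mpr h)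

theorem rcA_eq_cycB_coprime (d : Int) (hd : 2 ≤ d) (h2 : ¬ (2 ∣ d)) (h5 : ¬ (5 ∣ d)) :
    rcA d = cycB d := by
  obtain ⟨t, ht⟩ := firstPow1_isSome d hd h2 h5
  rw [rcA_char d hd, cycB_coprime d hd h2 h5, ht]

theorem rcA_noncop (d : Int) (hd : 2 ≤ d) (h : 2 ∣ d ∨ 5 ∣ d) :
    rcA d = if d = 2 then 0 else 1 := by
  rw [rcA_char d hd, firstPow1_none d hd h]

theorem cycB_le_rcA (d : Int) (hd : 2 ≤ d) : cycB d ≤ rcA d := by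
  by_cases h : 2 ∣ d ∨ 5 ∣ d
  · rw [cycB_noncop d h, rcA_noncop d hd h]
    split <;> omega
  · push_neg at h
    rw [rcA_eq_cycB_coprime d hd h.1 h.2]

-- main theorem ------------------------------------------------------------------
theorem euler26_eq (n : Int) (hn : 3 ≤ n) : euler26 n = euler26_alt n := by
  by_cases hn3 : n = 3
  · subst hn3; decide
  · have hn4 : 4 ≤ n := by omega
    have hsplit : PySem.List.pyRange 2 n 1 = 2 :: 3 :: PySem.List.pyRange 4 n 1 := by
      rw [PySem.List.pyRange_one_cons (show (2:Int) < n by omega),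
          PySem.List.pyRange_one_cons (show (2:Int) + 1 < n by omega)]
      norm_num
    have hds : ∀ d ∈ PySem.List.pyRange 2 n 1, 2 ≤ d := by
      intro d hdm
      rw [PySem.List.mem_pyRange_one] at hdm
      omega
    have hne : PySem.List.pyRange 2 n 1 ≠ [] := by
      rw [hsplit]; simp
    cases hmax : PySem.List.max? ((PySem.List.pyRange 2 n 1).map rcA) (fun x => x) with
    | none =>
      exfalso
      rw [PySem.List.max?_eq_none_iff] at hmax
      exact hne (List.map_eq_nil_iff.mp hmax)
    | some L =>
      have hLmem : L ∈ (PySem.List.pyRange 2 n 1).map rcA := PySem.List.max?_mem hmax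
      have hLmax : ∀ y ∈ (PySem.List.pyRange 2 n 1).map rcA, y ≤ L := by
        intro y hy
        exact PySem.List.max?_isMax hmax y hy
      obtain ⟨dL, hdLmem, hdLval⟩ := List.mem_map.mp hLmem
      have h3mem : (3:Int) ∈ PySem.List.pyRange 2 n 1 := by
        rw [PySem.List.mem_pyRange_one]; omega
      have hL1 : 1 ≤ L := by
        have := hLmax (rcA 3) (List.mem_map.mpr ⟨3, h3mem, rfl⟩)
        have h3 : rcA 3 = 1 := by decide
        omega
      have hcycle_le : ∀ y ∈ PySem.List.pyRange 2 n 1, cycB y ≤ L := by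
        intro y hy
        have := hLmax (rcA y) (List.mem_map.mpr ⟨y, hy, rfl⟩)
        have := cycB_le_rcA y (hds y hy)
        omega
      have key : ∃ i0, (PySem.List.pyRange 2 n 1).find? (fun i => rcA i == L) = some i0
          ∧ (PySem.List.pyRange 2 n 1).find? (fun i => cycB i == L) = some i0 := by
        by_cases hL2 : 2 ≤ L
        · -- the maximum exceeds 1: A and B agree pointwise on who attains it
          have hcongr : (PySem.List.pyRange 2 n 1).find? (fun i => rcA i == L)
              = (PySem.List.pyRange 2 n 1).find? (fun i => cycB i == L) := by
            apply find?_congr_mem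
            intro y hy
            by_cases h : 2 ∣ y ∨ 5 ∣ y
            · have hA := rcA_noncop y (hds y hy) h
              have hB := cycB_noncop y h
              have h0 : ((0:Int) == L) = false := beq_eq_false_iff_ne.mpr (by omega)
              have h1 : ((1:Int) == L) = false := beq_eq_false_iff_ne.mpr (by omega)
              rw [hA, hB]
              split
              · rfl
              · rw [h0, h1]
            · push_neg at h
              rw [rcA_eq_cycB_coprime y (hds y hy) h.1 h.2]
          have hsome : ((PySem.List.pyRange 2 n 1).find? (fun i => rcA i == L)).isSome := by
            apply List.find?_isSome.mpr
            refine ⟨dL, hdLmem, ?_⟩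
            show (rcA dL == L) = true
            rw [hdLval]
            exact beq_self_eq_true L
          obtain ⟨i0, hi0⟩ := Option.isSome_iff_exists.mp hsome
          exact ⟨i0, hi0, by rw [← hcongr]; exact hi0⟩
        · -- the maximum is exactly 1: both programs find 3 first
          have hLeq : L = 1 := by omega
          subst hLeq
          refine ⟨3, ?_, ?_⟩
          · rw [hsplit, List.find?_cons_of_neg (by decide), List.find?_cons_of_pos (by decide)]
          · rw [hsplit, List.find?_cons_of_neg (by decide), List.find?_cons_of_pos (by decide)]
      obtain ⟨i0, hiA, hiB⟩ := key
      obtain ⟨tl, htl⟩ := filter_cons_of_find? hiA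
      unfold euler26
      rw [hmax]
      show (match (PySem.List.pyRange 2 n 1).filter (fun i => rcA i == L) with
            | [] => (0:Int) | i :: _ => i) = euler26_alt n
      rw [htl]
      show i0 = euler26_alt n
      unfold euler26_alt
      rw [foldl_best_spec cycB L i0 _ (-1) 0 (by omega) hcycle_le hiB]

-- ===== VERDICT (by name: the statement is the Claim_ definition above) =====
theorem euler26_spec : Claim_equal_euler26 := by
  intro n _ hpre
  unfold Spec_euler26
  exact euler26_eq n hpre
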